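-- pv_equiv track=rewrite | github.com/inesbmartins02/HYMET2 | scripts/classificationminimap.py | determine_taxonomic_level
-- ===== SOURCE A (Python) =====
-- def determine_taxonomic_level(lineage):
--     rank_order = [
--         'superkingdom', 'phylum', 'class', 'order',
--         'family', 'genus', 'species', 'strain'
--     ]
--
--     current_level = None
--     for part in lineage.split(';'):
--         part = part.strip()
--         if ':' in part:
--             rank, name = part.split(':', 1)
--             rank = rank.strip().lower()
--             if rank in rank_order:
--                 if current_level is None:
--                     current_level = rank
--                 else:
--                     current_index = rank_order.index(current_level)
--                     new_index = rank_order.index(rank)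
--                     if new_index > current_index:
--                         current_level = rank
--     return current_level if current_level is not None else 'root'
-- ===== SOURCE B (Python) =====
-- def determine_taxonomic_level(lineage):
--     rank_order = [
--         'superkingdom', 'phylum', 'class', 'order',
--         'family', 'genus', 'species', 'strain'
--     ]
--
--     present = set()
--     for part in lineage.split(';'):
--         part = part.strip()
--         if ':' in part:
--             rank, _name = part.split(':', 1)
--             rank = rank.strip().lower()
--             if rank in rank_order:
--                 present.add(rank)
--     for rank in reversed(rank_order):
--         if rank in present:
--             return rank
--     return 'root'
-- ===== Notes on version B (the rewrite author's own statement) =====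
-- stated objective: alternative
-- what changed: Replaces A's single-pass running-maximum-by-rank-index scan (with repeated list.index lookups) by two passes: first collect the set of valid ranks present in the lineage, then scan the fixed rank order deepest-first and return the first rank found in that set.
import Mathlib
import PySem

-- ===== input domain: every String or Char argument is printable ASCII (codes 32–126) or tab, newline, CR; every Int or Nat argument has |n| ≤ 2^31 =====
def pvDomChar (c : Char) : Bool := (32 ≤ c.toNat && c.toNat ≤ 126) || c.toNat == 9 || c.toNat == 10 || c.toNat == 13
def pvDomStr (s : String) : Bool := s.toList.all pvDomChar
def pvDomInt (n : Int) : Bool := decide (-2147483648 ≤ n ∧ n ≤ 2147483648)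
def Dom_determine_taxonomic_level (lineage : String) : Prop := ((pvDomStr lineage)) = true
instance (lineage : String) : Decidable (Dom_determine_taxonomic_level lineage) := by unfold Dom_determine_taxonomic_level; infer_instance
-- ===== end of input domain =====

-- B replaces A's running-max-while-scanning with two passes (collect the set of valid ranks present, then scan the rank order deepest-first); same return value, alternative structure, no speed claim.


-- shared literal constant from both sources
def pvRanks : List String :=
  ["superkingdom", "phylum", "class", "order", "family", "genus", "species", "strain"]

-- ===== PORT A =====
-- loop body of A's single pass: running maximum by index in pvRanks
def detA_step (current_level : Option String) (part0 : String) : Option String :=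
  let part := PySem.Str.strip part0
  if PySem.Str.isIn ":" part then
    let pieces := (PySem.Str.splitMax? part ":" 1).getD []
    let rank := PySem.Str.lower (PySem.Str.strip (pieces.headD ""))
    if pvRanks.contains rank then
      match current_level with
      | none => some rank
      | some cur =>
        -- cur and rank are both members of pvRanks here, so index? is some; .getD 0 is unreachable
        let current_index := (PySem.List.index? pvRanks cur).getD 0
        let new_index := (PySem.List.index? pvRanks rank).getD 0
        if current_index < new_index then some rank else some cur
    else current_level
  else current_level

def determine_taxonomic_level (lineage : String) : String :=
  match ((PySem.Str.split? lineage ";").getD []).foldl detA_step none with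
  | some lvl => lvl
  | none => "root"

-- ===== PORT B =====
-- pass 1 loop body of B: collect the valid ranks present into a set
def detB_step (present : PySem.Set String) (part0 : String) : PySem.Set String :=
  let part := PySem.Str.strip part0
  if PySem.Str.isIn ":" part then
    let pieces := (PySem.Str.splitMax? part ":" 1).getD []
    let rank := PySem.Str.lower (PySem.Str.strip (pieces.headD ""))
    if pvRanks.contains rank then PySem.Set.add present rank else present
  else present

def determine_taxonomic_level_alt (lineage : String) : String :=
  let present := ((PySem.Str.split? lineage ";").getD []).foldl detB_step PySem.Set.empty
  -- pass 2: first rank of the reversed rank order that is present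
  match pvRanks.reverse.find? (fun r => PySem.Set.contains present r) with
  | some rank => rank
  | none => "root"

-- ===== PRECONDITION & SPEC =====
def Spec_determine_taxonomic_level (lineage : String) (out : String) : Prop := out = determine_taxonomic_level_alt lineage
instance (lineage : String) (out : String) : Decidable (Spec_determine_taxonomic_level lineage out) := by unfold Spec_determine_taxonomic_level; infer_instance

-- ===== CLAIM (what is proved, stated in full; the proofs are below) =====
def Claim_equal_determine_taxonomic_level : Prop := ∀ (lineage : String), Dom_determine_taxonomic_level lineage → Spec_determine_taxonomic_level lineage (determine_taxonomic_level lineage)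

-- ===== LEMMAS AND PROOFS =====

-- the rank a part contributes (none if it has no ':' or its rank is not a valid one)
def pvExtract (part0 : String) : Option String :=
  let part := PySem.Str.strip part0
  if PySem.Str.isIn ":" part then
    let pieces := (PySem.Str.splitMax? part ":" 1).getD []
    let rank := PySem.Str.lower (PySem.Str.strip (pieces.headD ""))
    if pvRanks.contains rank then some rank else none
  else none

-- A's state update, abstracted over the extracted rank
def pvUpdA (acc : Option String) (rank : String) : Option String :=
  match acc with
  | none => some rank
  | some cur =>
    if (PySem.List.index? pvRanks cur).getD 0 < (PySem.List.index? pvRanks rank).getD 0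
    then some rank else some cur

-- B's second pass, written as nested ifs on the 8 membership booleans
def pvFindB (s : PySem.Set String) : Option String :=
  if PySem.Set.contains s "strain" then some "strain"
  else if PySem.Set.contains s "species" then some "species"
  else if PySem.Set.contains s "genus" then some "genus"
  else if PySem.Set.contains s "family" then some "family"
  else if PySem.Set.contains s "order" then some "order"
  else if PySem.Set.contains s "class" then some "class"
  else if PySem.Set.contains s "phylum" then some "phylum"
  else if PySem.Set.contains s "superkingdom" then some "superkingdom"
  else none

lemma findB_eq (s : PySem.Set String) :
    pvRanks.reverse.find? (fun r => PySem.Set.contains s r) = pvFindB s := by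
  rw [show pvRanks.reverse =
    ["strain", "species", "genus", "family", "order", "class", "phylum", "superkingdom"] from rfl]
  simp only [List.find?, pvFindB]
  repeat' split <;> simp_all

lemma stepA_char (acc : Option String) (part : String) :
    detA_step acc part = match pvExtract part with | none => acc | some r => pvUpdA acc r := by
  unfold detA_step pvExtract pvUpdA
  dsimp only
  split
  · split
    · cases acc <;> rfl
    · rfl
  · rfl

lemma stepB_char (s : PySem.Set String) (part : String) :
    detB_step s part = match pvExtract part with | none => s | some r => PySem.Set.add s r := by
  unfold detB_step pvExtract
  dsimp only
  split
  · split <;> rfl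
  · rfl

lemma extract_mem {part r : String} (h : pvExtract part = some r) : r ∈ pvRanks := by
  simp only [pvExtract] at h
  split at h
  · split at h
    · rename_i hc
      injection h with h'
      subst h'
      exact List.contains_iff_mem.mp hc
    · exact absurd h (by simp)
  · exact absurd h (by simp)

lemma contains_add (s : PySem.Set String) (x y : String) :
    PySem.Set.contains (PySem.Set.add s x) y = (PySem.Set.contains s y || (y == x)) := by
  rw [Bool.eq_iff_iff]
  simp [PySem.Set.mem_add]

lemma inv_step (s : PySem.Set String) (r : String) (hr : r ∈ pvRanks) :
    pvUpdA (pvFindB s) r = pvFindB (PySem.Set.add s r) := by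
  have hmem : r = "superkingdom" ∨ r = "phylum" ∨ r = "class" ∨ r = "order" ∨
      r = "family" ∨ r = "genus" ∨ r = "species" ∨ r = "strain" := by
    simpa [pvRanks] using hr
  unfold pvFindB
  simp only [contains_add]
  generalize PySem.Set.contains s "strain" = b7
  generalize PySem.Set.contains s "species" = b6
  generalize PySem.Set.contains s "genus" = b5
  generalize PySem.Set.contains s "family" = b4
  generalize PySem.Set.contains s "order" = b3
  generalize PySem.Set.contains s "class" = b2
  generalize PySem.Set.contains s "phylum" = b1
  generalize PySem.Set.contains s "superkingdom" = b0
  rcases hmem with h | h | h | h | h | h | h | h <;> subst h <;>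
    revert b0 b1 b2 b3 b4 b5 b6 b7 <;> decide

lemma fold_eq (parts : List String) : ∀ s : PySem.Set String,
    parts.foldl detA_step (pvFindB s) = pvFindB (parts.foldl detB_step s) := by
  induction parts with
  | nil => intro s; rfl
  | cons p ps ih =>
    intro s
    simp only [List.foldl_cons, stepA_char, stepB_char]
    cases he : pvExtract p with
    | none => exact ih s
    | some r =>
      dsimp only
      rw [inv_step s r (extract_mem he)]
      exact ih (PySem.Set.add s r)

-- ===== VERDICT (by name: the statement is the Claim_ definition above) =====
theorem determine_taxonomic_level_spec : Claim_equal_determine_taxonomic_level := by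
  intro lineage _
  unfold Spec_determine_taxonomic_level determine_taxonomic_level determine_taxonomic_level_alt
  have h := fold_eq ((PySem.Str.split? lineage ";").getD []) PySem.Set.empty
  rw [show pvFindB PySem.Set.empty = none from rfl] at h
  dsimp only
  rw [h, findB_eq]
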